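-- pv_equiv track=rewrite | github.com/intel/edge-developer-kit-reference-scripts | usecases/ai/smart-parking/server/utils/video_stream.py | _carpark_data
-- ===== SOURCE A (Python) =====
-- def _carpark_data(cp_bboxes, occupied_carpark):
--     value = []
--     for i in range(len(cp_bboxes)):
--         if i in occupied_carpark:
--             occupied_or_unoccupied = 1
--             value.append(occupied_or_unoccupied)
--         else:
--             occupied_or_unoccupied = 0
--             value.append(occupied_or_unoccupied)
--
--     return value
-- ===== SOURCE B (Python) =====
-- def _carpark_data(cp_bboxes, occupied_carpark):
--     n = len(cp_bboxes)
--     value = [0] * n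
--     for idx in occupied_carpark:
--         if 0 <= idx < n:
--             value[idx] = 1
--     return value
-- ===== Notes on version B (the rewrite author's own statement) =====
-- stated objective: alternative
-- what changed: Instead of one membership test of occupied_carpark per index with per-branch appends, B pre-fills a zero list of length len(cp_bboxes) and scatters 1 into each in-range occupied index in a single pass over occupied_carpark.
import Mathlib
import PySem

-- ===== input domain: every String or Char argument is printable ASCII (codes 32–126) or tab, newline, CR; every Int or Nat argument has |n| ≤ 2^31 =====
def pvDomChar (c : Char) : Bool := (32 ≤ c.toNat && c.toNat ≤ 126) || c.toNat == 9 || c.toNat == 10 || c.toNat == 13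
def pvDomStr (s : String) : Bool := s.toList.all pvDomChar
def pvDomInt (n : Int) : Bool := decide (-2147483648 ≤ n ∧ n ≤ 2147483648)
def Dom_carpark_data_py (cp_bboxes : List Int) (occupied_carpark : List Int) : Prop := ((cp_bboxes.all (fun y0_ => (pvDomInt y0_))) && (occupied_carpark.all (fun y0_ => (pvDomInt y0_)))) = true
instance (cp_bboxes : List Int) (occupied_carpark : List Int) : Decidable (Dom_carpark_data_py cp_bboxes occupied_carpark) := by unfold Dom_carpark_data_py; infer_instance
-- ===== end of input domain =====

-- B replaces A's per-index membership scan by a pre-zeroed list and one scatter pass over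
-- occupied_carpark (objective: alternative decomposition; same observable behaviour).

-- ===== PORT A =====
-- A: for i in range(len(cp_bboxes)): append 1 if i in occupied_carpark else 0
def carpark_data_py (cp_bboxes : List Int) (occupied_carpark : List Int) : List Int :=
  (List.range cp_bboxes.length).foldl
    (fun (value : List Int) (i : Nat) =>
      if (i : Int) ∈ occupied_carpark then value ++ [(1 : Int)]
      else value ++ [(0 : Int)])
    []

-- ===== PORT B =====
-- B's loop body: if 0 <= idx < n then value[idx] = 1
def pvScatterOne (value : List Int) (idx : Int) : List Int :=
  if 0 ≤ idx ∧ idx < value.length then value.set idx.toNat 1 else value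

def carpark_data_py_alt (cp_bboxes : List Int) (occupied_carpark : List Int) : List Int :=
  occupied_carpark.foldl pvScatterOne (List.replicate cp_bboxes.length 0)

-- ===== PRECONDITION & SPEC =====
def Spec_carpark_data_py (cp_bboxes : List Int) (occupied_carpark : List Int) (out : List Int) : Prop := out = carpark_data_py_alt cp_bboxes occupied_carpark
instance (cp_bboxes : List Int) (occupied_carpark : List Int) (out : List Int) : Decidable (Spec_carpark_data_py cp_bboxes occupied_carpark out) := by unfold Spec_carpark_data_py; infer_instance

-- ===== CLAIM (what is proved, stated in full; the proofs are below) =====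
def Claim_equal_carpark_data_py : Prop := ∀ (cp_bboxes : List Int) (occupied_carpark : List Int), Dom_carpark_data_py cp_bboxes occupied_carpark → Spec_carpark_data_py cp_bboxes occupied_carpark (carpark_data_py cp_bboxes occupied_carpark)

-- ===== LEMMAS AND PROOFS =====

theorem pvScatter_length (occ : List Int) (l : List Int) :
    (occ.foldl pvScatterOne l).length = l.length := by
  induction occ generalizing l with
  | nil => rfl
  | cons a occ ih =>
    simp only [List.foldl_cons]
    rw [ih]
    unfold pvScatterOne
    split <;> simp

theorem pvScatter_get (occ : List Int) (l : List Int) (i : Nat) (hi : i < l.length)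
    (hg : i < (occ.foldl pvScatterOne l).length) :
    (occ.foldl pvScatterOne l)[i] = if (i : Int) ∈ occ then 1 else l[i] := by
  induction occ generalizing l with
  | nil => simp
  | cons a occ ih =>
    simp only [List.foldl_cons] at hg ⊢
    have hlen : (pvScatterOne l a).length = l.length := by
      unfold pvScatterOne; split <;> simp
    have hi' : i < (pvScatterOne l a).length := by rw [hlen]; exact hi
    have hstep : (pvScatterOne l a)[i]'hi' = if a = (i : Int) then 1 else l[i] := by
      unfold pvScatterOne
      by_cases hr : 0 ≤ a ∧ a < (l.length : Int)
      · by_cases hai : a = (i : Int)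
        · simp [hai, Int.toNat_natCast, hi]
        · have hne : a.toNat ≠ i := by omega
          simp [hr, hai, hne]
      · have hai : a ≠ (i : Int) := by
          intro h
          exact hr ⟨by omega, by omega⟩
        simp [hr, hai]
    rw [ih (pvScatterOne l a) hi' hg]
    by_cases hmem : (i : Int) ∈ occ
    · simp [hmem]
    · simp only [hmem, if_false]
      simpa [List.mem_cons, hmem, eq_comm] using hstep

theorem pvA_foldl (occ : List Int) (xs : List Nat) (acc : List Int) :
    xs.foldl
      (fun (value : List Int) (i : Nat) =>
        if (i : Int) ∈ occ then value ++ [(1 : Int)] else value ++ [(0 : Int)]) acc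
      = acc ++ xs.map (fun (i : Nat) => if (i : Int) ∈ occ then (1 : Int) else 0) := by
  induction xs generalizing acc with
  | nil => simp
  | cons a xs ih =>
    simp only [List.foldl_cons, List.map_cons]
    rw [ih]
    split <;> simp [List.append_assoc]

-- ===== VERDICT (by name: the statement is the Claim_ definition above) =====
theorem carpark_data_py_spec : Claim_equal_carpark_data_py := by
  intro cp occ _
  unfold Spec_carpark_data_py carpark_data_py carpark_data_py_alt
  rw [pvA_foldl]
  apply List.ext_getElem
  · simp [pvScatter_length]
  · intro i h1 h2
    have hi : i < cp.length := by simpa using h1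
    have hrep : i < (List.replicate cp.length (0 : Int)).length := by simpa using hi
    rw [pvScatter_get occ _ i hrep h2]
    simp only [List.nil_append, List.getElem_map, List.getElem_range, List.getElem_replicate]
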